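-- pv_equiv track=rewrite | github.com/allthingssecurity/archagents | plan_to_drawio.py | _layout_nodes_in_lanes
-- ===== SOURCE A (Python) =====
-- from typing import Dict, List, Any, Tuple
--
-- NODE_SPACING_X = 200
--
-- DIAGRAM_MARGIN = 40
--
-- def _layout_nodes_in_lanes(plan: Dict[str, Any], lane_y: Dict[str, int]) -> Dict[str, Tuple[float, float]]:
--     """Calculate node positions with intelligent layout."""
--     positions: Dict[str, Tuple[float, float]] = {}
--     nodes_by_lane: Dict[str, List[Dict[str, Any]]] = {}
--
--     # Group nodes by lane
--     for node in plan.get("nodes", []):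
--         lane = node.get("lane", "Application")
--         nodes_by_lane.setdefault(lane, []).append(node)
--
--     # Position nodes in each lane
--     for lane, nodes in nodes_by_lane.items():
--         y = lane_y.get(lane, 120) + 35  # Center vertically in lane
--
--         # Sort by group to cluster related nodes
--         nodes.sort(key=lambda n: (n.get("group") or "zzz", n.get("id", "")))
--
--         x = DIAGRAM_MARGIN + 180  # Start after lane label
--         for node in nodes:
--             positions[node["id"]] = (x, y)
--             x += NODE_SPACING_X
--
--     return positions
-- ===== SOURCE B (Python) =====
-- from typing import Dict, List, Any, Tuple
--
-- NODE_SPACING_X = 200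
--
-- DIAGRAM_MARGIN = 40
--
-- def _layout_nodes_in_lanes(plan: Dict[str, Any], lane_y: Dict[str, int]) -> Dict[str, Tuple[float, float]]:
--     """Single globally sorted pass: lane first-appearance index as primary sort key,
--     then one walk with per-lane x counters."""
--     nodes = plan.get("nodes", [])
--     lane_index: Dict[str, int] = {}
--     for node in nodes:
--         lane = node.get("lane", "Application")
--         if lane not in lane_index:
--             lane_index[lane] = len(lane_index)
--     ordered = sorted(nodes, key=lambda n: (n.get("group") or "zzz", n.get("id", "")))
--     ordered = sorted(ordered, key=lambda n: lane_index[n.get("lane", "Application")])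
--     positions: Dict[str, Tuple[float, float]] = {}
--     x_next: Dict[str, int] = {}
--     for node in ordered:
--         lane = node.get("lane", "Application")
--         x = x_next.get(lane, DIAGRAM_MARGIN + 180)
--         positions[node["id"]] = (x, lane_y.get(lane, 120) + 35)
--         x_next[lane] = x + NODE_SPACING_X
--     return positions
-- ===== Notes on version B (the rewrite author's own statement) =====
-- stated objective: alternative
-- what changed: Replaces A's per-lane grouping dict and nested per-lane positioning loops by one global pipeline: a lane->first-appearance-index dict, two stable sorts of the whole node list ((group,id) then lane index), and a single pass with a per-lane x-counter dict.
import Mathlib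
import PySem

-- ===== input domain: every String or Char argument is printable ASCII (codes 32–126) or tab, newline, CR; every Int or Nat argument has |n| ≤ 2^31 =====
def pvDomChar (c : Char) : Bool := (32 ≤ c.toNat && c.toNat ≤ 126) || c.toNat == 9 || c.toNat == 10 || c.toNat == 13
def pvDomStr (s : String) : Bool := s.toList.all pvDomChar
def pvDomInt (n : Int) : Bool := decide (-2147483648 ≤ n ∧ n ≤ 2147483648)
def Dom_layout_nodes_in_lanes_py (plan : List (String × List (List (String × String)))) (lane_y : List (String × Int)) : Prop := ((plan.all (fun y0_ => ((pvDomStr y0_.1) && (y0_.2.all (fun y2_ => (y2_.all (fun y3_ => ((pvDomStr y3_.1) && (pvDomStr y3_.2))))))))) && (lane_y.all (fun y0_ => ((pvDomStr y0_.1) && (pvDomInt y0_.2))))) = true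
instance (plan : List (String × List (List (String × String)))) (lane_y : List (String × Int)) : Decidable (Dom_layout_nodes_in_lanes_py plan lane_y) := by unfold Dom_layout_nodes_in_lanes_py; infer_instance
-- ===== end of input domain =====

-- B replaces A's per-lane grouping dict and nested per-lane loops by ONE globally sorted
-- pass: lanes get a first-appearance index, the whole node list is stably sorted by
-- (group,id) then by that lane index, and a single walk with a per-lane x-counter dict
-- assigns the positions (objective: alternative decomposition).

-- shared helpers: the exact Python subexpressions node.get("lane","Application"),
-- (node.get("group") or "zzz") and node.get("id","") used by both versions
def pvLaneOf (node : List (String × String)) : String :=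
  (PySem.Dict.mk node).getD "lane" "Application"

def pvGroupKey (node : List (String × String)) : String :=
  match (PySem.Dict.mk node).get? "group" with
  | none => "zzz"
  | some s => if s = "" then "zzz" else s   -- "or": empty string is falsy

def pvIdKey (node : List (String × String)) : String :=
  (PySem.Dict.mk node).getD "id" ""

-- ===== PORT A =====
-- node["id"] is ported as getD "id" "": Pre_ excludes nodes without an "id" key (KeyError)
def layout_nodes_in_lanes_py (plan : List (String × List (List (String × String)))) (lane_y : List (String × Int)) : List (String × Int × Int) :=
  let nodes := (PySem.Dict.mk plan).getD "nodes" []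
  -- group nodes by lane: setdefault(lane, []).append(node)
  let nbl : PySem.Dict String (List (List (String × String))) :=
    nodes.foldl (fun d node => d.modify (pvLaneOf node) [] (· ++ [node])) PySem.Dict.empty
  let positions : PySem.Dict String (Int × Int) :=
    nbl.items.foldl (fun pos p =>
      let y := (PySem.Dict.mk lane_y).getD p.1 120 + 35
      let sortedNodes := PySem.List.sorted2 p.2 pvGroupKey pvIdKey
      (sortedNodes.foldl
        (fun st node => (st.1.insert (pvIdKey node) (st.2, y), st.2 + 200))
        (pos, (40 : Int) + 180)).1) PySem.Dict.empty
  positions.items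

-- ===== PORT B =====
def layout_nodes_in_lanes_py_alt (plan : List (String × List (List (String × String)))) (lane_y : List (String × Int)) : List (String × Int × Int) :=
  let nodes := (PySem.Dict.mk plan).getD "nodes" []
  -- lane -> first-appearance index
  let laneIndex : PySem.Dict String Int :=
    nodes.foldl (fun d node =>
      if d.contains (pvLaneOf node) then d else d.insert (pvLaneOf node) (d.size : Int)) PySem.Dict.empty
  -- two stable sorts: secondary key (group,id), then primary key lane_index[lane]
  -- (lane_index[...] always finds its key, so the lookup is ported as get? + getD)
  let ordered := PySem.List.sorted2 nodes pvGroupKey pvIdKey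
  let ordered2 := PySem.List.sorted ordered (fun n => (laneIndex.get? (pvLaneOf n)).getD 0)
  -- single pass: positions + per-lane x counters
  let final := ordered2.foldl (fun st node =>
      let lane := pvLaneOf node
      let x := st.2.getD lane ((40 : Int) + 180)
      (st.1.insert (pvIdKey node) (x, (PySem.Dict.mk lane_y).getD lane 120 + 35),
       st.2.insert lane (x + 200)))
    ((PySem.Dict.empty : PySem.Dict String (Int × Int)), (PySem.Dict.empty : PySem.Dict String Int))
  final.1.items

-- ===== PRECONDITION & SPEC =====
-- Pre_ excludes exactly the inputs where A raises KeyError: a node without an "id" key.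
def Pre_layout_nodes_in_lanes_py (plan : List (String × List (List (String × String)))) (lane_y : List (String × Int)) : Prop :=
  ∀ node ∈ (PySem.Dict.mk plan).getD "nodes" [], (PySem.Dict.mk node).contains "id" = true
instance (plan : List (String × List (List (String × String)))) (lane_y : List (String × Int)) : Decidable (Pre_layout_nodes_in_lanes_py plan lane_y) := by unfold Pre_layout_nodes_in_lanes_py; infer_instance

def pvWitness_layout_nodes_in_lanes_py : (List (String × List (List (String × String)))) × (List (String × Int)) :=
  ([("nodes", [[("id", "a"), ("lane", "L2")], [("id", "b")], [("id", "c"), ("lane", "L2"), ("group", "g")]])], [("L2", 200)])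

def Spec_layout_nodes_in_lanes_py (plan : List (String × List (List (String × String)))) (lane_y : List (String × Int)) (out : List (String × Int × Int)) : Prop := out = layout_nodes_in_lanes_py_alt plan lane_y
instance (plan : List (String × List (List (String × String)))) (lane_y : List (String × Int)) (out : List (String × Int × Int)) : Decidable (Spec_layout_nodes_in_lanes_py plan lane_y out) := by unfold Spec_layout_nodes_in_lanes_py; infer_instance

-- ===== CLAIM (what is proved, stated in full; the proofs are below) =====
def Claim_equal_layout_nodes_in_lanes_py : Prop := ∀ (plan : List (String × List (List (String × String)))) (lane_y : List (String × Int)), Dom_layout_nodes_in_lanes_py plan lane_y → Pre_layout_nodes_in_lanes_py plan lane_y → Spec_layout_nodes_in_lanes_py plan lane_y (layout_nodes_in_lanes_py plan lane_y)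

-- ===== LEMMAS AND PROOFS =====

-- ---- generic facts about insertBy (the insertion step of PySem's stable sorts) ----

-- insertBy walks past a prefix it does not insert before
theorem pv_insertBy_skip {α : Type} (before : α → α → Bool) (x : α) (ys zs : List α)
    (h : ∀ y ∈ ys, before x y = false) :
    PySem.List.insertBy before x (ys ++ zs) = ys ++ PySem.List.insertBy before x zs := by
  induction ys with
  | nil => rfl
  | cons y t ih =>
    simp only [List.cons_append, PySem.List.insertBy, h y (by simp)]
    simp only [Bool.false_eq_true, if_false, List.cons.injEq, true_and]
    exact ih (fun y hy => h y (by simp [hy]))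

-- insertBy puts x in front when it goes before everything
theorem pv_insertBy_front {α : Type} (before : α → α → Bool) (x : α) (zs : List α)
    (h : ∀ y ∈ zs, before x y = true) :
    PySem.List.insertBy before x zs = x :: zs := by
  cases zs with
  | nil => rfl
  | cons y t => simp [PySem.List.insertBy, h y (by simp)]

-- insertBy preserves sortedness (before asymmetric and negatively transitive)
theorem pv_insertBy_pairwise {α : Type} (before : α → α → Bool)
    (hasymm : ∀ a b, before a b = true → before b a = false)
    (hnt : ∀ a b c, before a b = false → before b c = false → before a c = false)
    (x : α) (l : List α) (hl : l.Pairwise (fun a b => before b a = false)) :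
    (PySem.List.insertBy before x l).Pairwise (fun a b => before b a = false) := by
  induction l with
  | nil => simp [PySem.List.insertBy]
  | cons y t ih =>
    rcases List.pairwise_cons.1 hl with ⟨hy, ht⟩
    by_cases hxy : before x y = true
    · simp only [PySem.List.insertBy, hxy, if_true]
      refine List.pairwise_cons.2 ⟨?_, hl⟩
      intro z hz
      rcases List.mem_cons.1 hz with rfl | hz
      · exact hasymm _ _ hxy
      · exact hnt _ _ _ (hy z hz) (hasymm _ _ hxy)
    · have hxy' : before x y = false := by revert hxy; cases before x y <;> simp
      simp only [PySem.List.insertBy, hxy']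
      simp only [Bool.false_eq_true, if_false]
      refine List.pairwise_cons.2 ⟨?_, ih ht⟩
      intro z hz
      rcases (PySem.List.mem_insertBy before x z t).1 hz with rfl | hz
      · exact hxy'
      · exact hy z hz

-- on a sorted list, filtering commutes with insertBy
theorem pv_filter_insertBy {α : Type} (before : α → α → Bool)
    (hnt : ∀ a b c, before a b = false → before b c = false → before a c = false)
    (p : α → Bool) (x : α) (l : List α) (hl : l.Pairwise (fun a b => before b a = false)) :
    (PySem.List.insertBy before x l).filter p =
      if p x then PySem.List.insertBy before x (l.filter p) else l.filter p := by
  induction l with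
  | nil => cases hp : p x <;> simp [PySem.List.insertBy, List.filter, hp]
  | cons y t ih =>
    rcases List.pairwise_cons.1 hl with ⟨hy, ht⟩
    by_cases hxy : before x y = true
    · -- everything in y :: t is after x
      have hall : ∀ z ∈ y :: t, before x z = true := by
        intro z hz
        rcases List.mem_cons.1 hz with rfl | hz
        · exact hxy
        · by_contra hc
          have hxz : before x z = false := by revert hc; cases before x z <;> simp
          have := hnt x z y hxz (hy z hz)
          rw [this] at hxy; exact Bool.false_ne_true hxy
      have hallf : ∀ z ∈ (y :: t).filter p, before x z = true :=
        fun z hz => hall z (List.mem_of_mem_filter hz)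
      rw [pv_insertBy_front before x (y :: t) hall]
      cases hp : p x
      · simp [List.filter, hp]
      · rw [pv_insertBy_front before x ((y :: t).filter p) hallf]
        simp [List.filter, hp]
    · have hxy' : before x y = false := by revert hxy; cases before x y <;> simp
      simp only [PySem.List.insertBy, hxy', Bool.false_eq_true, if_false]
      cases hp : p x
      · cases hpy : p y <;> simpa [List.filter, hpy, hp] using ih ht
      · cases hpy : p y
        · simpa [List.filter, hpy, hp] using ih ht
        · have hih := ih ht
          rw [hp] at hih
          simp only [if_true] at hih
          simp only [List.filter, hpy, hih, hp, if_true]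
          simp [PySem.List.insertBy, hxy']

-- pointwise-equal bucket functions give the same flatMap
theorem pv_flatMap_congr {α β : Type} {l : List α} {f g : α → List β}
    (h : ∀ a ∈ l, f a = g a) : l.flatMap f = l.flatMap g := by
  induction l with
  | nil => rfl
  | cons a t ih =>
    simp only [List.flatMap_cons, h a (by simp), ih (fun a ha => h a (by simp [ha]))]

-- folding over a flatMap is the nested fold
theorem pv_foldl_flatMap {α β γ : Type} (l : List α) (g : α → List β) (f : γ → β → γ) (init : γ) :
    (l.flatMap g).foldl f init = l.foldl (fun acc a => (g a).foldl f acc) init := by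
  induction l generalizing init with
  | nil => rfl
  | cons a t ih => simp only [List.flatMap_cons, List.foldl_append, List.foldl_cons, ih]

-- ---- the lexicographic comparator used by sorted2, and its order properties ----

theorem pv_blt_asymm {α : Type} (k1 k2 : α → String) (a b : α) :
    ((decide (k1 a < k1 b) || (!decide (k1 b < k1 a) && decide (k2 a < k2 b))) = true) →
    (decide (k1 b < k1 a) || (!decide (k1 a < k1 b) && decide (k2 b < k2 a))) = false := by
  intro h
  simp only [Bool.or_eq_true, Bool.and_eq_true, Bool.not_eq_true', decide_eq_true_eq,
    decide_eq_false_iff_not] at h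
  simp only [Bool.or_eq_false_iff, Bool.and_eq_false_iff, Bool.not_eq_false',
    decide_eq_true_eq, decide_eq_false_iff_not]
  rcases h with h | ⟨h1, h2⟩
  · exact ⟨lt_asymm h, Or.inl h⟩
  · exact ⟨h1, Or.inr (lt_asymm h2)⟩

theorem pv_blt_negtrans {α : Type} (k1 k2 : α → String) (a b c : α) :
    ((decide (k1 a < k1 b) || (!decide (k1 b < k1 a) && decide (k2 a < k2 b))) = false) →
    ((decide (k1 b < k1 c) || (!decide (k1 c < k1 b) && decide (k2 b < k2 c))) = false) →
    (decide (k1 a < k1 c) || (!decide (k1 c < k1 a) && decide (k2 a < k2 c))) = false := by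
  simp only [Bool.or_eq_false_iff, Bool.and_eq_false_iff, Bool.not_eq_false',
    decide_eq_true_eq, decide_eq_false_iff_not]
  rintro ⟨hab, h2⟩ ⟨hbc, h3⟩
  have hba : k1 b ≤ k1 a := not_lt.mp hab
  have hcb : k1 c ≤ k1 b := not_lt.mp hbc
  refine ⟨not_lt.mpr (le_trans hcb hba), ?_⟩
  by_cases hca : k1 c < k1 a
  · exact Or.inl hca
  · have hac : k1 a = k1 c := le_antisymm (not_lt.mp hca) (le_trans hcb hba)
    have hb_eq_a : k1 b = k1 a := le_antisymm hba (hac ▸ hcb)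
    rcases h2 with h2 | h2
    · exact absurd (hb_eq_a ▸ h2) (lt_irrefl _)
    · rcases h3 with h3 | h3
      · exact absurd (hb_eq_a.symm ▸ hac ▸ h3) (lt_irrefl _)
      · exact Or.inr (fun h => h2 (lt_of_lt_of_le h (not_lt.mp h3)))

-- sorted2 unfolded to its insertion-sort foldl (definitional)
theorem pv_sorted2_eq {α : Type} (xs : List α) (k1 k2 : α → String) :
    PySem.List.sorted2 xs k1 k2 =
      xs.foldl (fun acc x => PySem.List.insertBy
        (fun a b => decide (k1 a < k1 b) || (!decide (k1 b < k1 a) && decide (k2 a < k2 b))) x acc) [] := rfl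

-- sorted2's output is sorted for its comparator
theorem pv_sorted2_pairwise {α : Type} (xs : List α) (k1 k2 : α → String) :
    (PySem.List.sorted2 xs k1 k2).Pairwise (fun a b =>
      (decide (k1 b < k1 a) || (!decide (k1 a < k1 b) && decide (k2 b < k2 a))) = false) := by
  induction xs using List.reverseRecOn with
  | nil => simp [pv_sorted2_eq]
  | append_singleton xs x ih =>
    rw [pv_sorted2_eq] at ih ⊢
    rw [List.foldl_append, List.foldl_cons, List.foldl_nil]
    exact pv_insertBy_pairwise _ (fun a b => pv_blt_asymm k1 k2 a b)
      (fun a b c => pv_blt_negtrans k1 k2 a b c) x _ ih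

-- filtering commutes with the stable sort sorted2
theorem pv_filter_sorted2 {α : Type} (xs : List α) (k1 k2 : α → String) (p : α → Bool) :
    (PySem.List.sorted2 xs k1 k2).filter p = PySem.List.sorted2 (xs.filter p) k1 k2 := by
  induction xs using List.reverseRecOn with
  | nil => simp [pv_sorted2_eq]
  | append_singleton xs x ih =>
    rw [pv_sorted2_eq, List.foldl_append, List.foldl_cons, List.foldl_nil, ← pv_sorted2_eq]
    rw [pv_filter_insertBy _ (fun a b c => pv_blt_negtrans k1 k2 a b c) p x _
      (pv_sorted2_pairwise xs k1 k2), List.filter_append]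
    cases hp : p x
    · simp only [if_false, List.filter_cons, hp, Bool.false_eq_true, List.filter_nil,
        List.append_nil, ih]
    · simp only [if_true, List.filter_cons, hp, List.filter_nil, ih]
      rw [pv_sorted2_eq (xs.filter p ++ [x]), List.foldl_append, List.foldl_cons, List.foldl_nil,
        ← pv_sorted2_eq]

-- a stable sort by an Int key that is constant on groups g and strictly increasing
-- along the group list K splits into the K-buckets in order
theorem pv_sorted_buckets {α : Type} (L : List α) (f : α → Int) (g : α → String)
    (h : String → Int) (K : List String)
    (hf : ∀ a, f a = h (g a))
    (hK : K.Pairwise (fun a b => h a < h b))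
    (hmem : ∀ a ∈ L, g a ∈ K) :
    PySem.List.sorted L f = K.flatMap (fun k => L.filter (fun a => g a == k)) := by
  induction L using List.reverseRecOn with
  | nil => simp [PySem.List.sorted]
  | append_singleton L x ih =>
    have hmem' : ∀ a ∈ L, g a ∈ K := fun a ha => hmem a (by simp [ha])
    rw [PySem.List.sorted_eq_foldl_insertBy, List.foldl_append, List.foldl_cons, List.foldl_nil,
        ← PySem.List.sorted_eq_foldl_insertBy, ih hmem']
    obtain ⟨K1, K2, hKsplit⟩ := List.append_of_mem (hmem x (by simp))
    subst hKsplit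
    rw [List.pairwise_append] at hK
    obtain ⟨hK1, hK2', hcross⟩ := hK
    have hgx_lt : ∀ k ∈ K2, h (g x) < h k := (List.pairwise_cons.1 hK2').1
    have hlt_gx : ∀ k ∈ K1, h k < h (g x) := fun k hk => hcross k hk (g x) (by simp)
    have hyval : ∀ k, ∀ y ∈ L.filter (fun a => g a == k), f y = h k := by
      intro k y hy
      have hgy : g y = k := eq_of_beq (List.mem_filter.1 hy).2
      rw [hf y, hgy]
    have hne1 : ∀ k ∈ K1, (g x == k) = false := by
      intro k hk
      cases hbe : (g x == k)
      · rfl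
      · exact absurd (hlt_gx k hk) (by rw [eq_of_beq hbe]; exact lt_irrefl _)
    have hne2 : ∀ k ∈ K2, (g x == k) = false := by
      intro k hk
      cases hbe : (g x == k)
      · rfl
      · exact absurd (hgx_lt k hk) (by rw [eq_of_beq hbe]; exact lt_irrefl _)
    have hown : (L ++ [x]).filter (fun a => g a == g x) = L.filter (fun a => g a == g x) ++ [x] := by
      rw [List.filter_append]; simp [List.filter_cons, List.filter_nil]
    have hR : ((K1 ++ g x :: K2).flatMap fun k => (L ++ [x]).filter (fun a => g a == k))
        = (K1.flatMap fun k => L.filter (fun a => g a == k)) ++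
          ((L.filter (fun a => g a == g x) ++ [x]) ++
           (K2.flatMap fun k => L.filter (fun a => g a == k))) := by
      rw [List.flatMap_append, List.flatMap_cons]
      rw [pv_flatMap_congr (l := K1) (f := fun k => (L ++ [x]).filter (fun a => g a == k))
            (g := fun k => L.filter (fun a => g a == k))
            (fun k hk => by
              show (L ++ [x]).filter (fun a => g a == k) = L.filter (fun a => g a == k)
              rw [List.filter_append]; simp [List.filter_cons, List.filter_nil, hne1 k hk]),
          pv_flatMap_congr (l := K2) (f := fun k => (L ++ [x]).filter (fun a => g a == k))
            (g := fun k => L.filter (fun a => g a == k))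
            (fun k hk => by
              show (L ++ [x]).filter (fun a => g a == k) = L.filter (fun a => g a == k)
              rw [List.filter_append]; simp [List.filter_cons, List.filter_nil, hne2 k hk]),
          hown]
    rw [hR, List.flatMap_append, List.flatMap_cons, ← List.append_assoc]
    rw [pv_insertBy_skip _ x
        (K1.flatMap (fun k => L.filter (fun a => g a == k)) ++ L.filter (fun a => g a == g x))
        (K2.flatMap fun k => L.filter (fun a => g a == k)) ?hskip]
    case hskip =>
      intro y hy
      rcases List.mem_append.1 hy with hy | hy
      · obtain ⟨k, hk, hyk⟩ := List.mem_flatMap.1 hy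
        have : f y = h k := hyval k y hyk
        simp only [decide_eq_false_iff_not, not_lt, this, hf x]
        exact le_of_lt (hlt_gx k hk)
      · have : f y = h (g x) := hyval (g x) y hy
        simp [this, hf x]
    rw [pv_insertBy_front _ x (K2.flatMap fun k => L.filter (fun a => g a == k)) ?hfront]
    case hfront =>
      intro y hy
      obtain ⟨k, hk, hyk⟩ := List.mem_flatMap.1 hy
      have : f y = h k := hyval k y hyk
      simp only [decide_eq_true_eq, this, hf x]
      exact hgx_lt k hk
    simp [List.append_assoc]

-- ---- the laneIndex dict built by B: keys in first-appearance order, values 0,1,2,… ----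

theorem pv_laneIndex_aux (nodes : List (List (String × String))) (d : PySem.Dict String Int)
    (hnd : d.keys.Nodup)
    (hidx : ∀ i (hi : i < d.keys.length), d.get? d.keys[i] = some (i : Int)) :
    (nodes.foldl (fun d node =>
        if d.contains (pvLaneOf node) then d else d.insert (pvLaneOf node) (d.size : Int)) d).keys
        = nodes.foldl (fun s node => PySem.Set.add s (pvLaneOf node)) d.keys
      ∧ (nodes.foldl (fun d node =>
        if d.contains (pvLaneOf node) then d else d.insert (pvLaneOf node) (d.size : Int)) d).keys.Nodup
      ∧ ∀ i (hi : i < (nodes.foldl (fun d node =>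
        if d.contains (pvLaneOf node) then d else d.insert (pvLaneOf node) (d.size : Int)) d).keys.length),
          (nodes.foldl (fun d node =>
            if d.contains (pvLaneOf node) then d else d.insert (pvLaneOf node) (d.size : Int)) d).get?
            ((nodes.foldl (fun d node =>
              if d.contains (pvLaneOf node) then d else d.insert (pvLaneOf node) (d.size : Int)) d).keys[i])
            = some (i : Int) := by
  induction nodes generalizing d with
  | nil => exact ⟨rfl, hnd, hidx⟩
  | cons n t ih =>
    simp only [List.foldl_cons]
    by_cases hcP : d.contains (pvLaneOf n) = true
    case neg =>
      have hc : d.contains (pvLaneOf n) = false := by simpa using hcP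
      simp only [hc, Bool.false_eq_true, if_false]
      have hsize : d.size = d.keys.length := by simp [PySem.Dict.size, PySem.Dict.keys]
      have hkeys' : (d.insert (pvLaneOf n) (d.size : Int)).keys = d.keys ++ [pvLaneOf n] :=
        PySem.Dict.keys_insert_of_not_contains d _ hc
      have hnotmem : pvLaneOf n ∉ d.keys := by
        intro hmem
        have h' := (PySem.Dict.contains_iff_mem_keys d _).2 hmem
        rw [hc] at h'
        exact Bool.false_ne_true h'
      have hnd' : (d.insert (pvLaneOf n) (d.size : Int)).keys.Nodup := by
        rw [hkeys']
        exact List.nodup_append.2 ⟨hnd, List.nodup_singleton _,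
          by simpa using fun a ha (h : a = pvLaneOf n) => hnotmem (h ▸ ha)⟩
      have hidx' : ∀ i (hi : i < (d.insert (pvLaneOf n) (d.size : Int)).keys.length),
          (d.insert (pvLaneOf n) (d.size : Int)).get?
            ((d.insert (pvLaneOf n) (d.size : Int)).keys[i]) = some (i : Int) := by
        intro i hi
        simp only [hkeys'] at hi ⊢
        rcases Nat.lt_or_ge i d.keys.length with hlt | hge
        · rw [List.getElem_append_left hlt]
          have hne : d.keys[i] ≠ pvLaneOf n := fun he => hnotmem (he ▸ List.getElem_mem hlt)
          rw [PySem.Dict.get?_insert_of_ne _ _ hne]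
          exact hidx i hlt
        · have : i = d.keys.length := by
            simp only [List.length_append, List.length_singleton] at hi; omega
          subst this
          rw [List.getElem_concat_length]
          rw [PySem.Dict.get?_insert_self, hsize]
          rfl
      have hset : PySem.Set.add d.keys (pvLaneOf n) = d.keys ++ [pvLaneOf n] := by
        simp only [PySem.Set.add]
        rw [if_neg]
        intro hco
        exact hnotmem (by simpa [List.contains_iff_mem] using hco)
      obtain ⟨h1, h2, h3⟩ := ih (d.insert (pvLaneOf n) (d.size : Int)) hnd' hidx'
      exact ⟨by rw [h1, hkeys', hset], h2, h3⟩
    case pos =>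
      have hc : d.contains (pvLaneOf n) = true := hcP
      simp only [hc, if_true]
      have hset : PySem.Set.add d.keys (pvLaneOf n) = d.keys := by
        simp only [PySem.Set.add]
        rw [if_pos]
        simpa [List.contains_iff_mem] using (PySem.Dict.contains_iff_mem_keys d _).1 hc
      obtain ⟨h1, h2, h3⟩ := ih d hnd hidx
      exact ⟨by rw [h1, hset], h2, h3⟩

theorem pv_laneIndex_spec (nodes : List (List (String × String))) :
    (nodes.foldl (fun d node =>
        if d.contains (pvLaneOf node) then d else d.insert (pvLaneOf node) (d.size : Int))
        PySem.Dict.empty).keys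
      = nodes.foldl (fun s node => PySem.Set.add s (pvLaneOf node)) PySem.Set.empty ∧
    (nodes.foldl (fun d node =>
        if d.contains (pvLaneOf node) then d else d.insert (pvLaneOf node) (d.size : Int))
        PySem.Dict.empty).keys.Nodup ∧
    (nodes.foldl (fun d node =>
        if d.contains (pvLaneOf node) then d else d.insert (pvLaneOf node) (d.size : Int))
        PySem.Dict.empty).keys.Pairwise (fun a b =>
          ((nodes.foldl (fun d node =>
            if d.contains (pvLaneOf node) then d else d.insert (pvLaneOf node) (d.size : Int))
            PySem.Dict.empty).get? a).getD 0 <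
          ((nodes.foldl (fun d node =>
            if d.contains (pvLaneOf node) then d else d.insert (pvLaneOf node) (d.size : Int))
            PySem.Dict.empty).get? b).getD 0) := by
  obtain ⟨h1, h2, h3⟩ := pv_laneIndex_aux nodes PySem.Dict.empty PySem.Dict.nodup_keys_empty
    (by intro i hi; simp [PySem.Dict.keys_empty] at hi)
  refine ⟨h1, h2, ?_⟩
  rw [List.pairwise_iff_getElem]
  intro i j hi hj hij
  rw [h3 i hi, h3 j hj]
  simpa using hij

-- ---- B's single counter pass over one lane's bucket = A's integer-counter loop ----

theorem pv_counter_bucket (bucket : List (List (String × String))) (k : String)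
    (hbk : ∀ n ∈ bucket, pvLaneOf n = k)
    (lane_y : List (String × Int))
    (pos : PySem.Dict String (Int × Int)) (ctr : PySem.Dict String Int) (x0 : Int)
    (hx0 : ctr.getD k ((40 : Int) + 180) = x0) :
    bucket.foldl (fun st node =>
        (st.1.insert (pvIdKey node) (st.2.getD (pvLaneOf node) ((40 : Int) + 180),
            (PySem.Dict.mk lane_y).getD (pvLaneOf node) 120 + 35),
         st.2.insert (pvLaneOf node) (st.2.getD (pvLaneOf node) ((40 : Int) + 180) + 200)))
      (pos, ctr)
    = ((bucket.foldl (fun st node =>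
          (st.1.insert (pvIdKey node) (st.2, (PySem.Dict.mk lane_y).getD k 120 + 35), st.2 + 200))
        (pos, x0)).1,
       if bucket.isEmpty then ctr else ctr.insert k (x0 + 200 * bucket.length)) := by
  induction bucket generalizing pos ctr x0 with
  | nil => simpa using hx0.symm ▸ rfl
  | cons n t ih =>
    have hn : pvLaneOf n = k := hbk n (by simp)
    simp only [List.foldl_cons, hn, hx0]
    rw [ih (fun m hm => hbk m (by simp [hm])) _ (ctr.insert k (x0 + 200)) (x0 + 200)
        (PySem.Dict.getD_insert_self ctr k (x0 + 200) _)]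
    cases t with
    | nil => simp
    | cons m t' =>
      simp only [List.isEmpty_cons, Bool.false_eq_true, if_false, List.length_cons]
      rw [PySem.Dict.insert_insert_self]
      congr 1
      push_cast
      ring

-- ---- the outer loop: one global pass over the buckets = A's per-lane loops ----

theorem pv_outer (K : List String) (B : String → List (List (String × String)))
    (hB : ∀ k ∈ K, ∀ n ∈ B k, pvLaneOf n = k)
    (lane_y : List (String × Int))
    (pos : PySem.Dict String (Int × Int)) (ctr : PySem.Dict String Int)
    (hK : K.Nodup) (hctr : ∀ k ∈ K, ctr.contains k = false) :
    (K.foldl (fun st k => (B k).foldl (fun st node =>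
        (st.1.insert (pvIdKey node) (st.2.getD (pvLaneOf node) ((40 : Int) + 180),
            (PySem.Dict.mk lane_y).getD (pvLaneOf node) 120 + 35),
         st.2.insert (pvLaneOf node) (st.2.getD (pvLaneOf node) ((40 : Int) + 180) + 200))) st)
      (pos, ctr)).1
    = K.foldl (fun pos k => ((B k).foldl (fun st node =>
        (st.1.insert (pvIdKey node) (st.2, (PySem.Dict.mk lane_y).getD k 120 + 35), st.2 + 200))
        (pos, (40 : Int) + 180)).1) pos := by
  induction K generalizing pos ctr with
  | nil => rfl
  | cons k t ih =>
    rcases List.nodup_cons.1 hK with ⟨hknot, ht⟩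
    simp only [List.foldl_cons]
    rw [pv_counter_bucket (B k) k (hB k (by simp)) lane_y pos ctr ((40 : Int) + 180)
        (PySem.Dict.getD_of_not_contains ctr _ (hctr k (by simp)))]
    apply ih (fun k' hk' => hB k' (by simp [hk'])) _ _ ht
    intro k' hk'
    cases hbe : (B k).isEmpty
    · simp only [Bool.false_eq_true, if_false]
      rw [PySem.Dict.contains_insert]
      have : (k' == k) = false := by
        cases h' : (k' == k)
        · rfl
        · exact absurd (eq_of_beq h' ▸ hk') hknot
      rw [this]
      simpa using hctr k' (by simp [hk'])
    · simp only [if_true]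
      exact hctr k' (by simp [hk'])

-- ---- the full pipeline on the extracted node list ----

theorem pv_pipeline (nodes : List (List (String × String))) (lane_y : List (String × Int)) :
    ((nodes.foldl (fun d node => d.modify (pvLaneOf node) [] (· ++ [node])) PySem.Dict.empty).items.foldl
        (fun pos p =>
          ((PySem.List.sorted2 p.2 pvGroupKey pvIdKey).foldl
            (fun st node => (st.1.insert (pvIdKey node) (st.2, (PySem.Dict.mk lane_y).getD p.1 120 + 35), st.2 + 200))
            (pos, (40 : Int) + 180)).1) PySem.Dict.empty).items
      = ((PySem.List.sorted (PySem.List.sorted2 nodes pvGroupKey pvIdKey)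
            (fun n => ((nodes.foldl (fun d node =>
              if d.contains (pvLaneOf node) then d else d.insert (pvLaneOf node) (d.size : Int))
              PySem.Dict.empty).get? (pvLaneOf n)).getD 0)).foldl
          (fun st node =>
            (st.1.insert (pvIdKey node) (st.2.getD (pvLaneOf node) ((40 : Int) + 180),
                (PySem.Dict.mk lane_y).getD (pvLaneOf node) 120 + 35),
             st.2.insert (pvLaneOf node) (st.2.getD (pvLaneOf node) ((40 : Int) + 180) + 200)))
          ((PySem.Dict.empty : PySem.Dict String (Int × Int)),
           (PySem.Dict.empty : PySem.Dict String Int))).1.items := by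
  obtain ⟨hkeysB, hnodB, hPW⟩ := pv_laneIndex_spec nodes
  -- A side: rewrite the items fold as a fold over the lane keys, buckets by filter
  have hnodup : (nodes.foldl (fun d node => d.modify (pvLaneOf node) [] (· ++ [node])) PySem.Dict.empty).keys.Nodup :=
    PySem.Dict.nodup_keys_foldl_modify_key _ _ _ _ _ PySem.Dict.nodup_keys_empty
  have hkeys : (nodes.foldl (fun s node => PySem.Set.add s (pvLaneOf node)) PySem.Set.empty)
      = (nodes.foldl (fun d node => d.modify (pvLaneOf node) [] (· ++ [node])) PySem.Dict.empty).keys := by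
    rw [PySem.Dict.keys_foldl_modify_key, ← PySem.Set.update_map_eq_foldl_add]
    rfl
  have hgetD : ∀ k, (nodes.foldl (fun d node => d.modify (pvLaneOf node) [] (· ++ [node])) PySem.Dict.empty).getD k []
      = nodes.filter (fun n => pvLaneOf n == k) := by
    intro k
    have h1 : nodes.foldl (fun d node => d.modify (pvLaneOf node) [] (· ++ [node])) PySem.Dict.empty
        = (nodes.map (fun n => (pvLaneOf n, n))).foldl (fun d p => d.modify p.1 [] (· ++ [p.2])) PySem.Dict.empty := by
      rw [List.foldl_map]
    rw [h1, PySem.Dict.getD_foldl_modify_append]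
    simp [List.filter_map, List.map_map, Function.comp_def]
  rw [PySem.Dict.items_eq_map_keys _ hnodup ([] : List (List (String × String))), List.foldl_map]
  -- B side: the global sort splits into the lane buckets
  have hmemK : ∀ a ∈ PySem.List.sorted2 nodes pvGroupKey pvIdKey,
      pvLaneOf a ∈ (nodes.foldl (fun d node =>
        if d.contains (pvLaneOf node) then d else d.insert (pvLaneOf node) (d.size : Int))
        PySem.Dict.empty).keys := by
    intro a ha
    rw [hkeysB]
    have hanodes : a ∈ nodes := (PySem.List.sorted2_perm nodes pvGroupKey pvIdKey false).mem_iff.1 ha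
    have : nodes.foldl (fun s node => PySem.Set.add s (pvLaneOf node)) PySem.Set.empty
        = PySem.Set.ofList (nodes.map pvLaneOf) := by
      rw [PySem.Set.ofList_eq_foldl, ← PySem.Set.update_map_eq_foldl_add]
      rfl
    rw [this, PySem.Set.mem_ofList]
    exact List.mem_map_of_mem hanodes
  rw [pv_sorted_buckets (PySem.List.sorted2 nodes pvGroupKey pvIdKey) _ pvLaneOf
      (fun k => ((nodes.foldl (fun d node =>
        if d.contains (pvLaneOf node) then d else d.insert (pvLaneOf node) (d.size : Int))
        PySem.Dict.empty).get? k).getD 0)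
      ((nodes.foldl (fun d node =>
        if d.contains (pvLaneOf node) then d else d.insert (pvLaneOf node) (d.size : Int))
        PySem.Dict.empty).keys)
      (fun a => rfl) hPW hmemK]
  rw [pv_flatMap_congr
      (g := fun k => PySem.List.sorted2 (nodes.filter (fun a => pvLaneOf a == k)) pvGroupKey pvIdKey)
      (fun k _ => pv_filter_sorted2 nodes pvGroupKey pvIdKey _)]
  rw [pv_foldl_flatMap]
  rw [pv_outer _ _
      (fun k _ => fun n hn => eq_of_beq (List.mem_filter.1
        ((PySem.List.sorted2_perm _ pvGroupKey pvIdKey false).mem_iff.1 hn)).2)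
      lane_y PySem.Dict.empty PySem.Dict.empty hnodB
      (fun k _ => PySem.Dict.contains_empty k)]
  rw [hkeysB, hkeys]
  apply congrArg PySem.Dict.items
  apply PySem.List.foldl_congr_mem
  intro acc k _
  rw [hgetD k]

theorem pv_main (plan : List (String × List (List (String × String)))) (lane_y : List (String × Int)) :
    layout_nodes_in_lanes_py plan lane_y = layout_nodes_in_lanes_py_alt plan lane_y :=
  pv_pipeline ((PySem.Dict.mk plan).getD "nodes" []) lane_y

-- ===== VERDICT (by name: the statement is the Claim_ definition above) =====
theorem layout_nodes_in_lanes_py_spec : Claim_equal_layout_nodes_in_lanes_py := by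
  intro plan lane_y _ _
  exact pv_main plan lane_y
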